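-- pv_equiv track=rewrite | github.com/re-gius/rums-with-ties | data/rumwt_predictor.py | slates2users
-- ===== SOURCE A (Python) =====
-- from itertools import combinations
-- from collections import defaultdict
--
-- def slates2users(lines, slate_size):
--     slates_dict = defaultdict(list)
--     n = len(lines[0])
--     for ind in range(len(lines)):
--         l = lines[ind]
--         slate = [i for i in range(n) if l[i]!='-']
--         if len(slate) >= slate_size:
--             for subslate in combinations(slate, slate_size):
--                 subslate_enc = '.'.join(str(x) for x in subslate)
--                 slates_dict[subslate_enc].append(ind)
--     return slates_dict
-- ===== SOURCE B (Python) =====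
-- from itertools import combinations
-- from collections import defaultdict
--
-- def slates2users(lines, slate_size):
--     n = len(lines[0])
--     result = defaultdict(list)
--     if slate_size > n:
--         return result  # no size-slate_size subslate can exist
--     # distinct subslates, in first-appearance order (line-major, lexicographic within a line)
--     combos = dict.fromkeys(
--         c
--         for l in lines
--         for c in combinations([i for i in range(n) if l[i] != '-'], slate_size))
--     for c in combos:
--         result['.'.join(str(x) for x in c)] = [
--             ind for ind, l in enumerate(lines) if all(l[i] != '-' for i in c)]
--     return result
-- ===== Notes on version B (the rewrite author's own statement) =====
-- stated objective: faster
-- what changed: A loops over lines and appends each line index to a defaultdict entry per generated subslate, encoding the string key once per occurrence; B inverts the nesting: it first collects the distinct subslates (dict.fromkeys, first-appearance order) and then builds each key's value by one scan over the lines, encoding each key only once.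
import Mathlib
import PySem

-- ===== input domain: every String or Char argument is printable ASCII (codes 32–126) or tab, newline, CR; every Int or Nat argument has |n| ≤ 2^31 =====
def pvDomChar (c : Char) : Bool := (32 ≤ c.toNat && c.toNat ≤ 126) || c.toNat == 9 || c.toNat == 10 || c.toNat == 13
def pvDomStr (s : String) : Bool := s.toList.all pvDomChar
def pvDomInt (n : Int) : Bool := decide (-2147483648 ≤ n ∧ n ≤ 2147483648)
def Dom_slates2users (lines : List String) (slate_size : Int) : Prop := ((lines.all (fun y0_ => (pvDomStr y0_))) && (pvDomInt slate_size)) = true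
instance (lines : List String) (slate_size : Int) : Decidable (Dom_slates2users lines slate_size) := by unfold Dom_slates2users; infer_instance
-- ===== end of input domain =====

-- B inverts A's nesting: it first collects the DISTINCT subslates (in first-appearance order), then
-- builds each key's line-index list by one scan over the lines, instead of A's per-line dict appends.

-- shared helpers: both Pythons contain the same subexpressions l[i] != '-',
-- [i for i in range(n) if l[i] != '-'] and '.'.join(str(x) for x in c)
def pvTest (l : String) (i : Int) : Bool := decide (PySem.Str.pyGet? l i ≠ some '-')
def pvSlate (n : Int) (l : String) : List Int :=
  (PySem.List.pyRange 0 n 1).filter (pvTest l)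
def pvEnc (c : List Int) : String := PySem.Str.join "." (c.map PySem.Int.toStr)

-- ===== PORT A =====
def slates2users (lines : List String) (slate_size : Int) : List (String × List Int) :=
  let n : Int := PySem.Str.len (PySem.List.pyGetD lines 0 "")
  let d : PySem.Dict String (List Int) :=
    (PySem.List.pyRange 0 (PySem.List.len lines) 1).foldl (fun d ind =>
      let l := PySem.List.pyGetD lines ind ""
      let slate := pvSlate n l
      if slate_size ≤ (slate.length : Int) then
        (PySem.List.combinations slate slate_size.toNat).foldl
          (fun d c => d.modify (pvEnc c) [] (fun v => v ++ [ind])) d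
      else d) PySem.Dict.empty
  d.items

-- ===== PORT B =====
def slates2users_alt (lines : List String) (slate_size : Int) : List (String × List Int) :=
  let n : Int := PySem.Str.len (PySem.List.pyGetD lines 0 "")
  if n < slate_size then []  -- early return: the empty result's items
  else
  let combos : List (List Int) :=
    PySem.List.dedup (lines.flatMap (fun l =>
      PySem.List.combinations (pvSlate n l) slate_size.toNat))
  let result : PySem.Dict String (List Int) :=
    combos.foldl (fun d c =>
      d.insert (pvEnc c)
        (((PySem.List.enumerate lines).filter (fun p => c.all (pvTest p.2))).map (·.1)))
      PySem.Dict.empty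
  result.items

-- ===== PRECONDITION & SPEC =====
-- Pre_ excludes exactly the inputs where the Python A raises: an empty lines list (lines[0] →
-- IndexError), a negative slate_size (combinations(..., r) with r < 0 → ValueError), and any line
-- shorter than lines[0] (l[i] → IndexError).
def Pre_slates2users (lines : List String) (slate_size : Int) : Prop :=
  lines ≠ [] ∧ 0 ≤ slate_size ∧
  ∀ l ∈ lines, PySem.Str.len (PySem.List.pyGetD lines 0 "") ≤ PySem.Str.len l
instance (lines : List String) (slate_size : Int) : Decidable (Pre_slates2users lines slate_size) := by
  unfold Pre_slates2users; infer_instance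
def pvWitness_slates2users : List String × Int := (["ab-", "a-c", "-bc"], 2)

def Spec_slates2users (lines : List String) (slate_size : Int) (out : List (String × List Int)) : Prop := out = slates2users_alt lines slate_size
instance (lines : List String) (slate_size : Int) (out : List (String × List Int)) : Decidable (Spec_slates2users lines slate_size out) := by unfold Spec_slates2users; infer_instance

-- ===== CLAIM (what is proved, stated in full; the proofs are below) =====
def Claim_equal_slates2users : Prop := ∀ (lines : List String) (slate_size : Int), Dom_slates2users lines slate_size → Pre_slates2users lines slate_size → Spec_slates2users lines slate_size (slates2users lines slate_size)

-- ===== LEMMAS AND PROOFS =====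

-- proof-side abbreviations
def pvCombos (n : Int) (r : Nat) (l : String) : List (List Int) :=
  PySem.List.combinations (pvSlate n l) r
def pvEvents (lines : List String) (n : Int) (r : Nat) : List (String × Int) :=
  (PySem.List.enumerate lines).flatMap
    (fun p => (pvCombos n r p.2).map (fun c => (pvEnc c, p.1)))

-- ---- injectivity of the '.'-joined decimal key encoding ----
lemma pv_digitChar_inj : ∀ a < 10, ∀ b < 10, Nat.digitChar a = Nat.digitChar b → a = b := by decide

lemma pv_digits_inj : ∀ (a b : Nat), Nat.toDigits 10 a = Nat.toDigits 10 b → a = b := by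
  intro a
  induction a using Nat.strong_induction_on with
  | _ a ih =>
    intro b h
    rw [Nat.toDigits_eq_if (by norm_num), Nat.toDigits_eq_if (b := 10) (n := b) (by norm_num)] at h
    split_ifs at h with ha hb hb
    · exact pv_digitChar_inj a ha b hb (List.cons.inj h).1
    · have hlen := congrArg List.length h
      simp at hlen
      have := @Nat.length_toDigits_pos 10 (b / 10)
      simp [hlen] at this
    · have hlen := congrArg List.length h
      simp at hlen
      have := @Nat.length_toDigits_pos 10 (a / 10)
      simp [hlen] at this
    · have hlen1 : (Nat.toDigits 10 (a / 10)).length = (Nat.toDigits 10 (b / 10)).length := by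
        have hlen := congrArg List.length h
        simp at hlen; omega
      obtain ⟨h1, h2⟩ := List.append_inj h hlen1
      have hmod : a % 10 = b % 10 :=
        pv_digitChar_inj _ (Nat.mod_lt _ (by norm_num)) _ (Nat.mod_lt _ (by norm_num))
          (List.cons.inj h2).1
      have hdiv : a / 10 = b / 10 := ih (a / 10) (by omega) _ h1
      omega

lemma pv_no_dot_toChars (x : Int) (hx : 0 ≤ x) : '.' ∉ PySem.Int.toChars x := by
  intro hmem
  unfold PySem.Int.toChars at hmem
  rw [if_neg (by omega)] at hmem
  have := Nat.isDigit_of_mem_toDigits (by norm_num) (by norm_num) hmem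
  simp [Char.isDigit] at this

lemma pv_toChars_inj (x y : Int) (hx : 0 ≤ x) (hy : 0 ≤ y)
    (h : PySem.Int.toChars x = PySem.Int.toChars y) : x = y := by
  unfold PySem.Int.toChars at h
  rw [if_neg (by omega), if_neg (by omega)] at h
  have := pv_digits_inj _ _ h
  omega

lemma pv_marker_cancel : ∀ (a b u v : List Char), '.' ∉ a → '.' ∉ b →
    a ++ '.' :: u = b ++ '.' :: v → a = b ∧ u = v := by
  intro a
  induction a with
  | nil =>
    intro b u v _ hb h
    cases b with
    | nil => simpa using h
    | cons c bs =>
      simp at h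
      exact absurd (h.1 ▸ hb) (by simp)
  | cons c as ih =>
    intro b u v ha hb h
    cases b with
    | nil =>
      simp at h
      exact absurd (h.1 ▸ ha) (by simp)
    | cons d bs =>
      simp at h ha hb
      obtain ⟨h1, h2⟩ := h
      obtain ⟨rfl⟩ := h1
      obtain ⟨e1, e2⟩ := ih bs u v ha.2 hb.2 h2
      exact ⟨by simp [e1], e2⟩

lemma pv_join_cancel : ∀ (ps qs : List (List Char)), ps.length = qs.length →
    (∀ p ∈ ps, '.' ∉ p) → (∀ q ∈ qs, '.' ∉ q) →
    PySem.Chars.join ['.'] ps = PySem.Chars.join ['.'] qs → ps = qs := by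
  intro ps
  induction ps with
  | nil => intro qs hl _ _ _; cases qs with
    | nil => rfl
    | cons q t => simp at hl
  | cons p ps ih =>
    intro qs hl hp hq h
    cases qs with
    | nil => simp at hl
    | cons q t =>
      cases ps with
      | nil =>
        cases t with
        | nil => rw [PySem.Chars.join_singleton, PySem.Chars.join_singleton] at h; simp [h]
        | cons t1 ts => simp at hl
      | cons p1 ps1 =>
        cases t with
        | nil => simp at hl
        | cons t1 ts =>
          rw [PySem.Chars.join_cons_cons, PySem.Chars.join_cons_cons] at h
          simp only [List.append_assoc, List.singleton_append] at h
          obtain ⟨e1, e2⟩ := pv_marker_cancel _ _ _ _ (hp p (by simp)) (hq q (by simp)) h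
          have := ih (t1 :: ts) (by simpa using hl)
            (fun x hx => hp x (by simp [hx])) (fun x hx => hq x (by simp [hx])) e2
          simp [e1, this]

lemma pv_enc_inj (xs ys : List Int) (hx : ∀ x ∈ xs, 0 ≤ x) (hy : ∀ y ∈ ys, 0 ≤ y)
    (hlen : xs.length = ys.length) (h : pvEnc xs = pvEnc ys) : xs = ys := by
  unfold pvEnc at h
  have h' := congrArg String.toList h
  rw [PySem.Str.toList_join, PySem.Str.toList_join] at h'
  simp only [List.map_map] at h'
  have hmap : ∀ (l : List Int), (l.map (String.toList ∘ PySem.Int.toStr)) = l.map PySem.Int.toChars := by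
    intro l; apply List.map_congr_left; intro x _; simp [Function.comp, PySem.Int.toList_toStr]
  rw [hmap, hmap] at h'
  have hsep : ".".toList = ['.'] := rfl
  rw [hsep] at h'
  have := pv_join_cancel _ _ (by simp [hlen])
    (by intro p hp; simp at hp; obtain ⟨x, hx1, rfl⟩ := hp; exact pv_no_dot_toChars x (hx x hx1))
    (by intro p hp; simp at hp; obtain ⟨y, hy1, rfl⟩ := hp; exact pv_no_dot_toChars y (hy y hy1)) h'
  clear h h' hlen
  induction xs generalizing ys with
  | nil => cases ys with
    | nil => rfl
    | cons y t => simp at this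
  | cons x xt ih =>
    cases ys with
    | nil => simp at this
    | cons y yt =>
      simp at this
      have e1 := pv_toChars_inj x y (hx x (by simp)) (hy y (by simp)) this.1
      have e2 := ih yt (fun a ha => hx a (by simp [ha])) (fun a ha => hy a (by simp [ha])) this.2
      simp [e1, e2]

-- ---- generic list lemmas ----
lemma pv_sublist_iff_subset {l₁ l₂ : List Int} (h₁ : l₁.Pairwise (· < ·))
    (h₂ : l₂.Pairwise (· < ·)) : l₁.Sublist l₂ ↔ ∀ x ∈ l₁, x ∈ l₂ := by
  constructor
  · exact fun h x hx => h.subset hx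
  · intro h
    have hnd : l₁.Nodup := h₁.imp (fun hab => ne_of_lt hab)
    exact @List.sublist_of_subperm_of_pairwise _ _ ⟨fun a b h1 h2 => absurd h2 (lt_asymm h1)⟩ _ _
      (hnd.subperm h) h₁ h₂

lemma pv_flatMap_if {α β : Type} (l : List α) (P : α → Bool) (g : α → β) :
    (l.flatMap (fun p => if P p then [g p] else [])) = (l.filter P).map g := by
  induction l with
  | nil => rfl
  | cons x t ih =>
    by_cases h : P x <;> simp [List.flatMap_cons, h, ih]

lemma pv_filter_eq_of_nodup {α : Type} [BEq α] [LawfulBEq α] (l : List α) (hl : l.Nodup) (c : α) :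
    l.filter (fun x => x == c) = if c ∈ l then [c] else [] := by
  induction l with
  | nil => simp
  | cons x t ih =>
    simp at hl
    rw [List.filter_cons]
    by_cases h : x = c
    · subst h
      simp [hl.1, ih hl.2]
    · simp only [beq_iff_eq, h, if_false, ih hl.2]
      simp [List.mem_cons, Ne.symm h]

lemma pv_dedup_map {α β : Type} [BEq α] [LawfulBEq α] [BEq β] [LawfulBEq β] (f : α → β) (xs : List α)
    (hinj : ∀ a ∈ xs, ∀ b ∈ xs, f a = f b → a = b) :
    PySem.List.dedup (xs.map f) = (PySem.List.dedup xs).map f := by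
  simp only [PySem.List.dedup_eq_ofList]
  induction xs using List.reverseRecOn with
  | nil => rfl
  | append_singleton t x ih =>
    have hinj' : ∀ a ∈ t, ∀ b ∈ t, f a = f b → a = b := by
      intro a ha b hb; exact hinj a (by simp [ha]) b (by simp [hb])
    rw [List.map_append, List.map_singleton, PySem.Set.ofList_append_singleton,
        PySem.Set.ofList_append_singleton, ih hinj']
    rw [PySem.Set.add_eq_ite, PySem.Set.add_eq_ite]
    by_cases hm : x ∈ PySem.Set.ofList t
    · have : f x ∈ (PySem.Set.ofList t).map f := List.mem_map_of_mem hm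
      simp [hm, this]
    · have : f x ∉ (PySem.Set.ofList t).map f := by
        intro hc
        obtain ⟨a, ha, hfa⟩ := List.mem_map.mp hc
        have ha' : a ∈ t := (PySem.Set.mem_ofList _ _).mp ha
        have := hinj a (by simp [ha']) x (by simp) hfa
        exact hm (this ▸ ha)
      simp [hm, this]

lemma pv_nodup_combinations {α : Type} (xs : List α) (r : Nat) (h : xs.Nodup) :
    (PySem.List.combinations xs r).Nodup := by
  induction xs generalizing r with
  | nil => cases r <;> simp [PySem.List.combinations_zero, PySem.List.combinations_nil_succ]
  | cons x t ih =>
    cases r with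
    | zero => simp [PySem.List.combinations_zero]
    | succ r =>
      rw [PySem.List.combinations_cons_succ]
      simp at h
      apply List.Nodup.append
      · exact (ih r h.2).map (fun a b hab => by simpa using hab)
      · exact ih (r + 1) h.2
      · intro c hc1 hc2
        obtain ⟨c', hc', rfl⟩ := List.mem_map.mp hc1
        have hsub := (PySem.List.mem_combinations_iff _ _ _).mp hc2
        exact h.1 (hsub.1.subset (by simp))

-- ---- facts about slates and combos ----
lemma pv_slate_pairwise (n : Int) (l : String) : (pvSlate n l).Pairwise (· < ·) :=
  (PySem.List.pairwise_lt_pyRange_one 0 n).sublist List.filter_sublist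

lemma pv_mem_slate (n : Int) (l : String) (x : Int) :
    x ∈ pvSlate n l ↔ (0 ≤ x ∧ x < n) ∧ pvTest l x := by
  simp [pvSlate, List.mem_filter, PySem.List.mem_pyRange_one]

lemma pv_mem_combos (n : Int) (r : Nat) (l : String) (c : List Int) (hc : c ∈ pvCombos n r l) :
    c.length = r ∧ c.Pairwise (· < ·) ∧ ∀ x ∈ c, 0 ≤ x ∧ x < n := by
  obtain ⟨hsub, hlen⟩ := (PySem.List.mem_combinations_iff _ _ _).mp hc
  refine ⟨hlen, (pv_slate_pairwise n l).sublist hsub, ?_⟩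
  intro x hx
  exact ((pv_mem_slate n l x).mp (hsub.subset hx)).1

lemma pv_mem_combos_iff (n : Int) (r : Nat) (l : String) (c : List Int)
    (hlen : c.length = r) (hpw : c.Pairwise (· < ·)) (hrange : ∀ x ∈ c, 0 ≤ x ∧ x < n) :
    c ∈ pvCombos n r l ↔ c.all (pvTest l) := by
  rw [pvCombos, PySem.List.mem_combinations_iff,
      pv_sublist_iff_subset hpw (pv_slate_pairwise n l)]
  simp only [hlen, and_true, List.all_eq_true]
  constructor
  · intro h x hx
    exact ((pv_mem_slate n l x).mp (h x hx)).2
  · intro h x hx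
    exact (pv_mem_slate n l x).mpr ⟨hrange x hx, h x hx⟩

lemma pv_mem_cs (lines : List String) (n : Int) (r : Nat) (c : List Int)
    (hc : c ∈ PySem.List.dedup (lines.flatMap (fun l => pvCombos n r l))) :
    c.length = r ∧ c.Pairwise (· < ·) ∧ ∀ x ∈ c, 0 ≤ x ∧ x < n := by
  rw [PySem.List.dedup_eq_ofList, PySem.Set.mem_ofList] at hc
  obtain ⟨l, _, hcl⟩ := List.mem_flatMap.mp hc
  exact pv_mem_combos n r l c hcl

-- ---- port A, characterised ----
lemma pv_A_fold (lines : List String) (slate_size : Int) (hk : 0 ≤ slate_size) :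
    slates2users lines slate_size =
      ((pvEvents lines (PySem.Str.len (PySem.List.pyGetD lines 0 "")) slate_size.toNat).foldl
        (fun d p => d.modify p.1 [] (fun v => v ++ [p.2])) PySem.Dict.empty).items := by
  unfold slates2users pvEvents
  rw [PySem.List.enumerate_eq_map_pyRange lines "", List.flatMap_map]
  dsimp only
  rw [List.foldl_flatMap]
  congr 1
  apply PySem.List.foldl_congr_mem
  intro acc ind hmem
  rw [List.foldl_map]
  split_ifs with hguard
  · rfl
  · rw [pvCombos, PySem.List.combinations_eq_nil_of_length_lt]
    · rfl
    · omega

lemma pv_A_eq (lines : List String) (slate_size : Int) (hk : 0 ≤ slate_size) :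
    slates2users lines slate_size =
      (PySem.List.dedup ((pvEvents lines (PySem.Str.len (PySem.List.pyGetD lines 0 "")) slate_size.toNat).map (·.1))).map
        (fun key => (key,
          ((pvEvents lines (PySem.Str.len (PySem.List.pyGetD lines 0 "")) slate_size.toNat).filter
            (fun q => q.1 == key)).map (·.2))) := by
  rw [pv_A_fold lines slate_size hk]
  have hnodup : ((pvEvents lines (PySem.Str.len (PySem.List.pyGetD lines 0 "")) slate_size.toNat).foldl
      (fun d p => d.modify p.1 [] (fun v => v ++ [p.2])) PySem.Dict.empty).keys.Nodup :=
    PySem.Dict.nodup_keys_foldl_modify_key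
      (pvEvents lines (PySem.Str.len (PySem.List.pyGetD lines 0 "")) slate_size.toNat)
      (fun (p : String × Int) => p.1) [] (fun _ p => fun v => v ++ [p.2])
      PySem.Dict.empty (by simp [PySem.Dict.keys_empty])
  rw [PySem.Dict.items_eq_map_keys _ hnodup []]
  rw [PySem.Dict.keys_foldl_modify_key
      (pvEvents lines (PySem.Str.len (PySem.List.pyGetD lines 0 "")) slate_size.toNat)
      (fun (p : String × Int) => p.1) [] (fun _ p => fun v => v ++ [p.2]),
      PySem.Dict.keys_empty]
  rw [show ([] : List String) = PySem.Set.empty from rfl, PySem.Set.update_empty]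
  apply List.map_congr_left
  intro key _
  congr 1
  rw [PySem.Dict.getD_foldl_modify_append]
  simp [PySem.Dict.getD_empty]

-- ---- port B, characterised ----
lemma pv_B_eq (lines : List String) (slate_size : Int) :
    slates2users_alt lines slate_size =
      (PySem.List.dedup (lines.flatMap (fun l =>
          pvCombos (PySem.Str.len (PySem.List.pyGetD lines 0 "")) slate_size.toNat l))).map
        (fun c => (pvEnc c,
          ((PySem.List.enumerate lines).filter (fun p => c.all (pvTest p.2))).map (·.1))) := by
  unfold slates2users_alt
  dsimp only
  split_ifs with hbig
  · have hnil : lines.flatMap (fun l =>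
        pvCombos (PySem.Str.len (PySem.List.pyGetD lines 0 "")) slate_size.toNat l) = [] := by
      rw [List.flatMap_eq_nil_iff]
      intro l _
      rw [pvCombos, PySem.List.combinations_eq_nil_of_length_lt]
      have h1 : (pvSlate (PySem.Str.len (PySem.List.pyGetD lines 0 "")) l).length
          ≤ (PySem.List.pyRange 0 (PySem.Str.len (PySem.List.pyGetD lines 0 "")) 1).length :=
        List.length_filter_le _ _
      rw [PySem.List.length_pyRange_one] at h1
      have h2 : (0 : Int) ≤ PySem.Str.len (PySem.List.pyGetD lines 0 "") := by
        rw [PySem.Str.len_eq]; positivity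
      omega
    rw [hnil]
    rfl
  rw [PySem.Dict.items_foldl_insert_fresh _ (fun c => pvEnc c) _ PySem.Dict.empty
      (fun a _ => PySem.Dict.contains_empty _) ?hnd]
  · rw [show (PySem.Dict.empty : PySem.Dict String (List Int)).items = [] from rfl]
    rfl
  case hnd =>
    apply List.Nodup.map_on
    · intro a ha b hb hab
      have fa := pv_mem_cs lines _ _ a ha
      have fb := pv_mem_cs lines _ _ b hb
      exact pv_enc_inj a b (fun x hx => (fa.2.2 x hx).1) (fun y hy => (fb.2.2 y hy).1)
        (by omega) hab
    · rw [PySem.List.dedup_eq_ofList]; exact PySem.Set.nodup_ofList _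

-- ---- the two characterisations agree ----
lemma pv_events_map_fst (lines : List String) (n : Int) (r : Nat) :
    (pvEvents lines n r).map (·.1) = (lines.flatMap (fun l => pvCombos n r l)).map pvEnc := by
  unfold pvEvents
  rw [List.map_flatMap]
  conv_rhs => rw [← PySem.List.map_snd_enumerate lines 0, List.flatMap_map, List.map_flatMap]
  apply List.flatMap_congr
  intro p _
  simp [List.map_map, Function.comp]

lemma pv_value_eq (lines : List String) (n : Int) (r : Nat) (c : List Int)
    (hlen : c.length = r) (hpw : c.Pairwise (· < ·)) (hrange : ∀ x ∈ c, 0 ≤ x ∧ x < n) :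
    ((pvEvents lines n r).filter (fun q => q.1 == pvEnc c)).map (·.2) =
      ((PySem.List.enumerate lines).filter (fun p => c.all (pvTest p.2))).map (·.1) := by
  unfold pvEvents
  rw [List.filter_flatMap, List.map_flatMap]
  have step : ∀ p : Int × String,
      ((((pvCombos n r p.2).map (fun c' => (pvEnc c', p.1))).filter (fun q => q.1 == pvEnc c)).map (·.2))
        = if decide (c ∈ pvCombos n r p.2) then [p.1] else [] := by
    intro p
    rw [List.filter_map]
    have hcongr : (pvCombos n r p.2).filter ((fun q => q.1 == pvEnc c) ∘ (fun c' => (pvEnc c', p.1)))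
        = (pvCombos n r p.2).filter (fun c' => c' == c) := by
      apply List.filter_congr
      intro c' hc'
      have f' := pv_mem_combos n r p.2 c' hc'
      simp only [Function.comp_apply]
      by_cases h : c' = c
      · simp [h]
      · have hne : pvEnc c' ≠ pvEnc c := fun he =>
          h (pv_enc_inj c' c (fun x hx => (f'.2.2 x hx).1) (fun y hy => (hrange y hy).1)
            (by omega) he)
        simp [h, hne]
    rw [hcongr, pv_filter_eq_of_nodup _ ?nd c]
    · split_ifs with hm <;> simp_all
    case nd =>
      exact pv_nodup_combinations _ _ (List.Nodup.filter _ (PySem.List.nodup_pyRange_one 0 n))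
  rw [List.flatMap_congr (fun p _ => step p), pv_flatMap_if]
  congr 1
  apply List.filter_congr
  intro p _
  rw [show (c.all (pvTest p.2)) = decide (∀ x ∈ c, pvTest p.2 x = true) by
        cases hb : c.all (pvTest p.2)
        · simp at hb ⊢
          exact hb
        · simp at hb ⊢
          exact hb]
  simp [pv_mem_combos_iff n r p.2 c hlen hpw hrange]

-- ===== VERDICT (by name: the statement is the Claim_ definition above) =====
theorem slates2users_spec : Claim_equal_slates2users := by
  intro lines slate_size _ hpre
  show slates2users lines slate_size = slates2users_alt lines slate_size
  have hk : 0 ≤ slate_size := hpre.2.1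
  rw [pv_A_eq lines slate_size hk, pv_B_eq lines slate_size]
  have hinj : ∀ a ∈ lines.flatMap (fun l => pvCombos (PySem.Str.len (PySem.List.pyGetD lines 0 "")) slate_size.toNat l),
      ∀ b ∈ lines.flatMap (fun l => pvCombos (PySem.Str.len (PySem.List.pyGetD lines 0 "")) slate_size.toNat l),
      pvEnc a = pvEnc b → a = b := by
    intro a ha b hb hab
    obtain ⟨la, _, hla⟩ := List.mem_flatMap.mp ha
    obtain ⟨lb, _, hlb⟩ := List.mem_flatMap.mp hb
    have fa := pv_mem_combos _ _ _ a hla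
    have fb := pv_mem_combos _ _ _ b hlb
    exact pv_enc_inj a b (fun x hx => (fa.2.2 x hx).1) (fun y hy => (fb.2.2 y hy).1) (by omega) hab
  rw [pv_events_map_fst, pv_dedup_map pvEnc _ hinj, List.map_map]
  refine List.map_congr_left (fun c hc => ?_)
  have fc := pv_mem_cs lines _ _ c hc
  simp only [Function.comp_apply]
  exact congrArg (Prod.mk (pvEnc c)) (pv_value_eq lines _ _ c fc.1 fc.2.1 fc.2.2)
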